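-- pv_equiv track=rewrite | github.com/DomMorello/Dom-s-algorithm | src/baekjoonAlgorithm/password_4659.py | three_in_a_row
-- ===== SOURCE A (Python) =====
-- def three_in_a_row(pw, ls):
--     vow = 0
--     cons = 0
--     i = 0
--     while i < len(pw):
--         if pw[i] in ls:
--             cons = 0
--             vow += 1
--         else:
--             vow = 0
--             cons += 1
--         if vow >= 3 or cons >= 3:
--             return False
--         i += 1
--     return True
-- ===== SOURCE B (Python) =====
-- def three_in_a_row(pw, ls):
--     vowels = set(ls)
--     types = [c in vowels for c in pw]
--     return all(not (a == b == c) for a, b, c in zip(types, types[1:], types[2:]))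
-- ===== Notes on version B (the rewrite author's own statement) =====
-- stated objective: idiomatic
-- what changed: Replaces the two-counter reset-and-threshold state machine with building a membership set and the per-character vowel/consonant type sequence once, then checking every length-3 window of it via zip/all.
import Mathlib
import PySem

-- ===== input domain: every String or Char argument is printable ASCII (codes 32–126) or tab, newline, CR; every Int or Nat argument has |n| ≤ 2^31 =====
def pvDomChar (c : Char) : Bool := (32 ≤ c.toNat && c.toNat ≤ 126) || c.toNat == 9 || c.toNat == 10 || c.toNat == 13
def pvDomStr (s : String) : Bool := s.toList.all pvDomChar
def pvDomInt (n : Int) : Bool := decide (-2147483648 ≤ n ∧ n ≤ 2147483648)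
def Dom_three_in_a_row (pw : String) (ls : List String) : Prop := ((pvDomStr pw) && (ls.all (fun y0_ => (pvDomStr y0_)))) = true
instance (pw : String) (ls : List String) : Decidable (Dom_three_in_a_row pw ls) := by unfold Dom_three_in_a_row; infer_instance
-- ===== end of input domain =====

-- B replaces A's two-counter reset-and-threshold state machine by building the per-character
-- type sequence once and checking every length-3 window of it (idiomatic; same cost).

-- ===== PORT A =====
-- A's while loop over indices 0..len(pw)-1 with state (vow, cons), transliterated as the
-- obvious structural recursion over the character list with the same Int state.
def threeLoopA (ls : List String) : List Char → Int → Int → Bool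
  | [], _, _ => true
  | c :: rest, vow, cons =>
    let st : Int × Int := if ls.contains (String.ofList [c]) then (vow + 1, 0) else (0, cons + 1)
    if 3 ≤ st.1 ∨ 3 ≤ st.2 then false else threeLoopA ls rest st.1 st.2

def three_in_a_row (pw : String) (ls : List String) : Bool :=
  threeLoopA ls pw.toList 0 0

-- ===== PORT B =====
-- vowels = set(ls); types = [c in vowels for c in pw]
-- return all(not (a == b == c) for a,b,c in zip(types, types[1:], types[2:]))
def three_in_a_row_alt (pw : String) (ls : List String) : Bool :=
  let vowels : PySem.Set String := PySem.Set.ofList ls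
  let types : List Bool := pw.toList.map (fun c => PySem.Set.contains vowels (String.ofList [c]))
  (types.zip ((types.drop 1).zip (types.drop 2))).all
    (fun x => !(x.1 == x.2.1 && x.2.1 == x.2.2))

-- ===== PRECONDITION & SPEC =====
def Spec_three_in_a_row (pw : String) (ls : List String) (out : Bool) : Prop := out = three_in_a_row_alt pw ls
instance (pw : String) (ls : List String) (out : Bool) : Decidable (Spec_three_in_a_row pw ls out) := by unfold Spec_three_in_a_row; infer_instance

-- ===== CLAIM (what is proved, stated in full; the proofs are below) =====
def Claim_equal_three_in_a_row : Prop := ∀ (pw : String) (ls : List String), Dom_three_in_a_row pw ls → Spec_three_in_a_row pw ls (three_in_a_row pw ls)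

-- ===== LEMMAS AND PROOFS =====

-- "no three equal in a row", in recursive window form
def nt : List Bool → Bool
  | a :: b :: c :: r => (!(a == b && b == c)) && nt (b :: c :: r)
  | _ => true
termination_by l => l.length

theorem nt_cons_ne (a b : Bool) (l : List Bool) (h : a ≠ b) :
    nt (a :: b :: l) = nt (b :: l) := by
  cases l with
  | nil => simp [nt]
  | cons c r => simp [nt, h]

theorem toNat_two : (2 : Int).toNat = 2 := rfl

theorem nt_three (a b c : Bool) (r : List Bool) :
    nt (a :: b :: c :: r) = ((!(a == b && b == c)) && nt (b :: c :: r)) := by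
  simp [nt]

theorem zipAll_eq_nt (ts : List Bool) :
    (ts.zip ((ts.drop 1).zip (ts.drop 2))).all
      (fun x => !(x.1 == x.2.1 && x.2.1 == x.2.2)) = nt ts := by
  fun_induction nt ts with
  | case1 a b c r ih => simpa [nt] using congrArg (fun z => (!(a == b && b == c)) && z) ih
  | case2 x h =>
    match x with
    | [] => simp [nt]
    | [a] => simp [nt]
    | [a, b] => simp [nt]
    | a :: b :: c :: r => exact absurd rfl (h a b c r)

-- state invariant: A's loop computes nt of the padded type sequence
theorem loop_eq_nt (ls : List String) (cs : List Char) : ∀ v k : Int,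
    ((v = 0 ∧ k = 0) ∨ (v = 1 ∧ k = 0) ∨ (v = 2 ∧ k = 0) ∨ (v = 0 ∧ k = 1) ∨ (v = 0 ∧ k = 2)) →
    threeLoopA ls cs v k
      = nt (List.replicate v.toNat true ++ List.replicate k.toNat false
            ++ cs.map (fun c => ls.contains (String.ofList [c]))) := by
  induction cs with
  | nil =>
    intro v k h
    rcases h with ⟨hv, hk⟩ | ⟨hv, hk⟩ | ⟨hv, hk⟩ | ⟨hv, hk⟩ | ⟨hv, hk⟩ <;>
      subst hv <;> subst hk <;> simp [threeLoopA, nt]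
  | cons c rest ih =>
    intro v k h
    cases hcb : ls.contains (String.ofList [c]) <;>
      rcases h with ⟨hv, hk⟩ | ⟨hv, hk⟩ | ⟨hv, hk⟩ | ⟨hv, hk⟩ | ⟨hv, hk⟩ <;> subst hv <;> subst hk <;>
      simp only [threeLoopA, hcb, List.map_cons, Bool.false_eq_true, if_true, if_false,
        ite_true, ite_false, Int.toNat_zero, Int.toNat_one, toNat_two, zero_add, one_add_one_eq_two,
        List.replicate_succ, List.replicate_zero, List.nil_append, List.cons_append]
    -- hcb = false (consonant) branch, states (0,0) (1,0) (2,0) (0,1) (0,2)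
    · rw [if_neg (by norm_num), ih 0 1 (by norm_num)]
      simp [List.replicate]
    · rw [if_neg (by norm_num), ih 0 1 (by norm_num)]
      simp only [Int.toNat_zero, Int.toNat_one, List.replicate_succ, List.replicate_zero,
        List.nil_append, List.cons_append]
      exact (nt_cons_ne true false _ (by simp)).symm
    · rw [if_neg (by norm_num), ih 0 1 (by norm_num)]
      simp only [Int.toNat_zero, Int.toNat_one, List.replicate_succ, List.replicate_zero,
        List.nil_append, List.cons_append, nt_three]
      simp
      exact (nt_cons_ne true false _ (by simp)).symm
    · rw [if_neg (by norm_num), ih 0 2 (by norm_num)]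
      simp [List.replicate]
    · rw [if_pos (by norm_num)]
      simp [nt_three]
    -- hcb = true (vowel) branch, states (0,0) (1,0) (2,0) (0,1) (0,2)
    · rw [if_neg (by norm_num), ih 1 0 (by norm_num)]
      simp [List.replicate]
    · rw [if_neg (by norm_num), ih 2 0 (by norm_num)]
      simp [List.replicate]
    · rw [if_pos (by norm_num)]
      simp [nt_three]
    · rw [if_neg (by norm_num), ih 1 0 (by norm_num)]
      simp only [Int.toNat_zero, Int.toNat_one, List.replicate_succ, List.replicate_zero,
        List.nil_append, List.cons_append]
      exact (nt_cons_ne false true _ (by simp)).symm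
    · rw [if_neg (by norm_num), ih 1 0 (by norm_num)]
      simp only [Int.toNat_zero, Int.toNat_one, List.replicate_succ, List.replicate_zero,
        List.nil_append, List.cons_append, nt_three]
      simp
      exact (nt_cons_ne false true _ (by simp)).symm

-- ===== VERDICT (by name: the statement is the Claim_ definition above) =====
theorem three_in_a_row_spec : Claim_equal_three_in_a_row := by
  intro pw ls _
  unfold Spec_three_in_a_row three_in_a_row three_in_a_row_alt
  rw [zipAll_eq_nt, loop_eq_nt ls pw.toList 0 0 (by norm_num)]
  simp only [Int.toNat_zero, List.replicate_zero, List.nil_append]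
  congr 1
  apply List.map_congr_left
  intro c _
  simp [PySem.Set.contains_iff, PySem.Set.mem_ofList, List.contains_iff_mem]
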